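-- pv_equiv track=rewrite | github.com/julianbadillo/CodingExercises | python/src/advent_day14.py | process_template
-- ===== SOURCE A (Python) =====
-- def process_template(template):
--     count_pairs = {}
--     count_chars = {}
--     for i in range(len(template)):
--         if template[i] not in count_chars:
--             count_chars[template[i]] = 0
--         count_chars[template[i]] += 1
--         if i < len(template) - 1:
--             pair = template[i:i+2]
--             if pair not in count_pairs:
--                 count_pairs[pair] = 0
--             count_pairs[pair] += 1
--     return (count_pairs, count_chars)
-- ===== SOURCE B (Python) =====
-- def process_template(template):
--     # Dedup-then-count: enumerate the distinct keys in first-occurrence order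
--     # (dict.fromkeys) and count each key with list.count — no incremental
--     # accumulator updates at all.
--     chars = list(template)
--     pairs = [a + b for a, b in zip(template, template[1:])]
--     count_chars = {c: chars.count(c) for c in dict.fromkeys(chars)}
--     count_pairs = {p: pairs.count(p) for p in dict.fromkeys(pairs)}
--     return (count_pairs, count_chars)
-- ===== Notes on version B (the rewrite author's own statement) =====
-- stated objective: alternative
-- what changed: Replaces A's single index loop that increments two dicts in place by a dedup-then-count scheme: materialize the char and adjacent-pair lists, take the distinct keys in first-occurrence order via dict.fromkeys, and build each dict with a comprehension whose value is list.count(key), so no counter is ever incremented.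
import Mathlib
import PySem

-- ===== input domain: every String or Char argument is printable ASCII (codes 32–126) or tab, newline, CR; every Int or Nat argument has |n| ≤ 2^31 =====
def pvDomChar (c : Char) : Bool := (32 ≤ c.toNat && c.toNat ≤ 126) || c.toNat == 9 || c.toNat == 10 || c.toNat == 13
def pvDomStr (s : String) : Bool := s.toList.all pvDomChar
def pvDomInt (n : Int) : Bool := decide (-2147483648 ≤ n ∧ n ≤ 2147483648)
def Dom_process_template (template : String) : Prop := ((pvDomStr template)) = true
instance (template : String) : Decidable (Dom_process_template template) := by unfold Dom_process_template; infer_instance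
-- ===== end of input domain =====

-- B replaces A's single index loop with in-place counter increments by dedup-then-count:
-- distinct keys in first-occurrence order, each key's value computed by list.count
-- (alternative decomposition; no counter is ever incremented).

-- ===== PORT A =====
-- A's "if k not in d: d[k] = 0; d[k] += 1" pattern (used for both dicts)
def pvCountA (d : PySem.Dict String Int) (k : String) : PySem.Dict String Int :=
  let d := if d.contains k then d else d.insert k 0
  d.insert k (d.getD k 0 + 1)

def process_template (template : String) : (List (String × Int)) × (List (String × Int)) :=
  let cs := template.toList
  let n : Int := PySem.List.len cs
  let st :=
    (PySem.List.pyRange 0 n).foldl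
      (fun (st : PySem.Dict String Int × PySem.Dict String Int) i =>
        (if i < n - 1 then
            pvCountA st.1 (String.ofList (PySem.List.slice cs (some i) (some (i + 2))))
          else st.1,
         pvCountA st.2 (String.ofList [PySem.List.pyGetD cs i ' '])))
      (PySem.Dict.empty, PySem.Dict.empty)
  (st.1.items, st.2.items)

-- ===== PORT B =====
-- B's dict comprehension "{k: xs.count(k) for k in dict.fromkeys(xs)}"
def pvTally (xs : List String) : PySem.Dict String Int :=
  (PySem.List.dedup xs).foldl (fun d k => d.insert k (xs.count k : Int)) PySem.Dict.empty

def process_template_alt (template : String) : (List (String × Int)) × (List (String × Int)) :=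
  let cs := template.toList
  let chars := cs.map (fun c => String.ofList [c])
  let pairs := (cs.zip (PySem.List.slice cs (some 1) none)).map (fun p => String.ofList [p.1, p.2])
  ((pvTally pairs).items, (pvTally chars).items)

-- ===== PRECONDITION & SPEC =====
def Spec_process_template (template : String) (out : (List (String × Int)) × (List (String × Int))) : Prop := out = process_template_alt template
instance (template : String) (out : (List (String × Int)) × (List (String × Int))) : Decidable (Spec_process_template template out) := by unfold Spec_process_template; infer_instance

-- ===== CLAIM (what is proved, stated in full; the proofs are below) =====
def Claim_equal_process_template : Prop := ∀ (template : String), Dom_process_template template → Spec_process_template template (process_template template)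

-- ===== LEMMAS AND PROOFS =====

-- B's counting step written as the standard bump
def pvBump (d : PySem.Dict String Int) (k : String) : PySem.Dict String Int :=
  d.insert k (d.getD k 0 + 1)

-- A's two-statement counting pattern is the standard bump
theorem pvCountA_eq_pvBump (d : PySem.Dict String Int) (k : String) :
    pvCountA d k = pvBump d k := by
  by_cases h : d.contains k = true
  · simp [pvCountA, pvBump, h]
  · simp only [pvCountA, pvBump, Bool.not_eq_true] at *
    rw [if_neg (by simp [h])]
    rw [PySem.Dict.getD_insert_self, PySem.Dict.insert_insert_self,
        PySem.Dict.getD_of_not_contains d 0 (by simp [h])]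

-- the 2-slice at an in-range position is the adjacent character pair
theorem pvSlice_pair (cs : List Char) (i : Int) (h0 : 0 ≤ i) (h1 : i + 1 < (cs.length : Int)) :
    PySem.List.slice cs (some i) (some (i + 2)) =
      [PySem.List.pyGetD cs i ' ', PySem.List.pyGetD cs (i + 1) ' '] := by
  rw [PySem.List.slice_toNat cs h0 (by omega)]
  have h2 : (i + 2).toNat - i.toNat = 2 := by omega
  have hd : List.drop i.toNat cs = cs[i.toNat]'(by omega) :: cs[i.toNat + 1]'(by omega) :: List.drop (i.toNat + 2) cs := by
    rw [List.drop_eq_getElem_cons (by omega), List.drop_eq_getElem_cons (by omega)]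
  rw [h2, hd, List.take_succ_cons, List.take_succ_cons, List.take_zero,
      PySem.List.pyGetD_eq_getElem cs ' ' h0 (by omega),
      PySem.List.pyGetD_eq_getElem cs ' ' (by omega) (by omega)]
  have h3 : (i + 1).toNat = i.toNat + 1 := by omega
  simp only [h3]

-- zip of a list with its tail, as a map over positions
theorem pvZip_eq_map (cs : List Char) :
    cs.zip (cs.drop 1) =
      (List.range (cs.length - 1)).map
        (fun (k : Nat) => (PySem.List.pyGetD cs (k : Int) ' ', PySem.List.pyGetD cs ((k : Int) + 1) ' ')) := by
  apply List.ext_getElem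
  · simp [List.length_zip]
  · intro k h1 h2
    have hk : k < cs.length - 1 := by simpa using h2
    have e1 : ((k : Int) + 1) = ((k + 1 : Nat) : Int) := by push_cast; ring
    rw [List.getElem_zip, List.getElem_map, List.getElem_range, List.getElem_drop, e1,
        PySem.List.pyGetD_natCast, PySem.List.pyGetD_natCast,
        List.getD_eq_getElem cs ' ' (by omega), List.getD_eq_getElem cs ' ' (by omega)]
    simp only [Nat.add_comm 1 k]

-- A's guarded index loop over pairs equals the zip loop of bumps
theorem pvPairs_fold (cs : List Char) (d : PySem.Dict String Int) :
    (PySem.List.pyRange 0 (PySem.List.len cs)).foldl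
      (fun d i => if i < PySem.List.len cs - 1 then
          pvBump d (String.ofList (PySem.List.slice cs (some i) (some (i + 2)))) else d) d =
    (cs.zip (cs.drop 1)).foldl (fun d p => pvBump d (String.ofList [p.1, p.2])) d := by
  cases cs with
  | nil => simp [PySem.List.len, PySem.List.pyRange_one_eq_nil]
  | cons c cs' =>
    set cs := c :: cs' with hcs
    have hn : 1 ≤ cs.length := by simp [hcs]
    have hlen : PySem.List.len cs = ((cs.length - 1 : Nat) : Int) + 1 := by
      simp [PySem.List.len]; omega
    rw [hlen, PySem.List.pyRange_one_succ_right (by positivity), List.foldl_append]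
    simp only [List.foldl_cons, List.foldl_nil]
    rw [if_neg (by omega)]
    rw [PySem.List.foldl_congr_mem _ _
        (fun d i => pvBump d (String.ofList [PySem.List.pyGetD cs i ' ', PySem.List.pyGetD cs (i + 1) ' '])) d
        (by
          intro acc x hx
          rw [PySem.List.mem_pyRange_one] at hx
          rw [if_pos (by omega), pvSlice_pair cs x hx.1 (by omega)])]
    rw [PySem.List.pyRange_zero_nat, List.foldl_map, pvZip_eq_map, List.foldl_map]

-- a fold of bumps over mapped keys is Counter of the key list
theorem pvBump_fold_eq_counter {α : Type} (l : List α) (f : α → String) :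
    l.foldl (fun d x => pvBump d (f x)) PySem.Dict.empty = PySem.Dict.counter (l.map f) := by
  rw [← PySem.Dict.foldl_insert_getD_add_one_eq_counter, List.foldl_map]
  rfl

-- B's dedup-then-count dict has exactly Counter's items
theorem pvTally_items_eq_counter_items (xs : List String) :
    (pvTally xs).items = (PySem.Dict.counter xs).items := by
  have h := PySem.Dict.items_foldl_insert_fresh (PySem.List.dedup xs) (fun a => a)
      (fun a => (xs.count a : Int)) PySem.Dict.empty
      (fun a _ => PySem.Dict.contains_empty _)
      (by simpa using PySem.List.nodup_dedup xs)
  unfold pvTally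
  rw [PySem.Dict.items_counter]
  simpa [PySem.List.dedup_eq_ofList, PySem.Dict.empty] using h

-- ===== VERDICT (by name: the statement is the Claim_ definition above) =====
theorem process_template_spec : Claim_equal_process_template := by
  intro template _
  unfold Spec_process_template process_template process_template_alt
  dsimp only
  rw [PySem.List.foldl_prod_mk
      (fun d i => if i < PySem.List.len template.toList - 1 then
          pvCountA d (String.ofList (PySem.List.slice template.toList (some i) (some (i + 2)))) else d)
      (fun d i => pvCountA d (String.ofList [PySem.List.pyGetD template.toList i ' ']))]
  simp only [funext fun d => funext fun k => pvCountA_eq_pvBump d k]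
  rw [PySem.List.slice_from template.toList (by norm_num), pvPairs_fold,
      pvBump_fold_eq_counter (template.toList.zip (template.toList.drop 1))
        (fun p => String.ofList [p.1, p.2]),
      PySem.List.foldl_pyRange_zero_pyGetD template.toList ' '
        (fun d c => pvBump d (String.ofList [c])),
      pvBump_fold_eq_counter template.toList (fun c => String.ofList [c]),
      ← pvTally_items_eq_counter_items, ← pvTally_items_eq_counter_items]
  norm_num
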